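-- pv_equiv track=rewrite | github.com/nguyenngochuy91/Relevant-Operon | analyze.py | computeDuplication
-- ===== SOURCE A (Python) =====
-- from collections import Counter
--
-- def computeDuplication(string1,string2):
--     string1,string2 = string1.split("|"),string2.split("|")
--     duplicated1,duplicated2= set(),set()
--     for block in string1:
--         c = Counter(block)
--         for item in c:
--             if c[item]>=2:
--                 duplicated1.add(item)
--     for block in string2:
--         c = Counter(block)
--         for item in c:
--             if c[item]>=2:
--                 duplicated2.add(item)
-- #    print (duplicated1,duplicated2)
--     return len(duplicated1.symmetric_difference(duplicated2))
-- ===== SOURCE B (Python) =====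
-- def computeDuplication(string1, string2):
--     def dups(s):
--         out = set()
--         for block in s.split("|"):
--             b = sorted(block)
--             for x, y in zip(b, b[1:]):
--                 if x == y:
--                     out.add(x)
--         return out
--     return len(dups(string1) ^ dups(string2))
-- ===== Notes on version B (the rewrite author's own statement) =====
-- stated objective: alternative
-- what changed: Replaces the per-block frequency-table (Counter) build plus threshold pass with a sort-then-scan: each block is sorted and duplicated characters are read off as adjacent equal pairs, correct because equal characters are contiguous in a sorted block.
import Mathlib
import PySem

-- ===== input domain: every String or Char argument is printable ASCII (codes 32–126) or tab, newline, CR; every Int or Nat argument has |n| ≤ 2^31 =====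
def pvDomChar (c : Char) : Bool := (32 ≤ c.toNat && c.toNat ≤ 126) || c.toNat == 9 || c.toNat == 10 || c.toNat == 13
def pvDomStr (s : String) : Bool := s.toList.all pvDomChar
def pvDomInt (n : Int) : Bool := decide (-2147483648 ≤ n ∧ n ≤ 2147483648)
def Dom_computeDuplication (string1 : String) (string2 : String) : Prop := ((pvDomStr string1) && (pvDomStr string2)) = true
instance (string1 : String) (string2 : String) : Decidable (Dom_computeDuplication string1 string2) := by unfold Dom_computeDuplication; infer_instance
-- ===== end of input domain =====

-- B replaces A's per-block Counter + threshold pass with sort-then-scan (duplicates = adjacent equal pairs of the sorted block); same return value, proved equivalent.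

-- ===== PORT A =====
-- for block in blocks: c = Counter(block); for item in c: if c[item] >= 2: dup.add(item)
def pvDupA (blocks : List (List Char)) : PySem.Set Char :=
  blocks.foldl (fun dup block =>
    let c := PySem.Dict.counter block
    c.keys.foldl (fun dup item =>
      if c.getD item 0 ≥ 2 then PySem.Set.add dup item else dup) dup)
    PySem.Set.empty

def computeDuplication (string1 : String) (string2 : String) : Int :=
  let s1 := PySem.Chars.splitOn string1.toList ['|']
  let s2 := PySem.Chars.splitOn string2.toList ['|']
  let duplicated1 := pvDupA s1
  let duplicated2 := pvDupA s2
  PySem.Set.len (PySem.Set.symmDiff duplicated1 duplicated2)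

-- ===== PORT B =====
-- for x, y in zip(b, b[1:]): if x == y: out.add(x)
def pvAdjAdd : List Char → PySem.Set Char → PySem.Set Char
  | x :: y :: t, d => pvAdjAdd (y :: t) (if x = y then PySem.Set.add d x else d)
  | _, d => d

-- for block in s.split("|"): b = sorted(block); <adjacent scan>
def pvDupB (blocks : List (List Char)) : PySem.Set Char :=
  blocks.foldl (fun out block =>
    pvAdjAdd (PySem.List.sorted block (fun c => c) false) out) PySem.Set.empty

def computeDuplication_alt (string1 : String) (string2 : String) : Int :=
  PySem.Set.len (PySem.Set.symmDiff (pvDupB (PySem.Chars.splitOn string1.toList ['|']))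
                                    (pvDupB (PySem.Chars.splitOn string2.toList ['|'])))

-- ===== PRECONDITION & SPEC =====
def Spec_computeDuplication (string1 : String) (string2 : String) (out : Int) : Prop := out = computeDuplication_alt string1 string2
instance (string1 : String) (string2 : String) (out : Int) : Decidable (Spec_computeDuplication string1 string2 out) := by unfold Spec_computeDuplication; infer_instance

-- ===== CLAIM (what is proved, stated in full; the proofs are below) =====
def Claim_equal_computeDuplication : Prop := ∀ (string1 : String) (string2 : String), Dom_computeDuplication string1 string2 → Spec_computeDuplication string1 string2 (computeDuplication string1 string2)

-- ===== LEMMAS AND PROOFS =====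

-- A's inner loop: fold over a list adding elements satisfying p
theorem memA_inner (l : List Char) (p : Char → Prop) [DecidablePred p]
    (d : PySem.Set Char) (x : Char) :
    x ∈ l.foldl (fun dup item => if p item then PySem.Set.add dup item else dup) d ↔
      x ∈ d ∨ (x ∈ l ∧ p x) := by
  induction l generalizing d with
  | nil => simp
  | cons a t ih =>
    simp only [List.foldl_cons, List.mem_cons]
    by_cases hp : p a
    · simp only [if_pos hp, ih, PySem.Set.mem_add]
      constructor
      · rintro (⟨h | rfl⟩ | ⟨h1, h2⟩)
        · exact Or.inl h
        · exact Or.inr ⟨Or.inl rfl, hp⟩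
        · exact Or.inr ⟨Or.inr h1, h2⟩
      · rintro (h | ⟨rfl | h1, h2⟩)
        · exact Or.inl (Or.inl h)
        · exact Or.inl (Or.inr rfl)
        · exact Or.inr ⟨h1, h2⟩
    · simp only [if_neg hp, ih]
      constructor
      · rintro (h | ⟨h1, h2⟩)
        · exact Or.inl h
        · exact Or.inr ⟨Or.inr h1, h2⟩
      · rintro (h | ⟨rfl | h1, h2⟩)
        · exact Or.inl h
        · exact absurd h2 hp
        · exact Or.inr ⟨h1, h2⟩

theorem nodupA_inner (l : List Char) (p : Char → Prop) [DecidablePred p]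
    (d : PySem.Set Char) (hd : d.Nodup) :
    (l.foldl (fun dup item => if p item then PySem.Set.add dup item else dup) d).Nodup := by
  induction l generalizing d with
  | nil => exact hd
  | cons a t ih =>
    simp only [List.foldl_cons]
    split_ifs
    · exact ih _ (PySem.Set.nodup_add _ _ hd)
    · exact ih _ hd

-- B's inner scan on a nondecreasing list flags exactly the chars with count ≥ 2
theorem mem_pvAdjAdd (l : List Char) (hl : l.Pairwise (· ≤ ·)) (d : PySem.Set Char) (x : Char) :
    x ∈ pvAdjAdd l d ↔ x ∈ d ∨ 2 ≤ l.count x := by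
  induction l generalizing d with
  | nil => simp [pvAdjAdd]
  | cons a t ih =>
    cases t with
    | nil =>
      have hc : List.count x [a] ≤ 1 := by
        simpa using List.count_le_length (l := [a]) (a := x)
      simp only [pvAdjAdd]
      constructor
      · exact Or.inl
      · rintro (h | h)
        · exact h
        · omega
    | cons b t' =>
      have hab : a ≤ b := (List.pairwise_cons.1 hl).1 _ (List.mem_cons_self)
      have htl : (b :: t').Pairwise (· ≤ ·) := (List.pairwise_cons.1 hl).2
      simp only [pvAdjAdd]
      rw [ih htl]
      by_cases heq : a = b
      · subst heq
        rw [if_pos rfl]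
        simp only [PySem.Set.mem_add, List.count_cons]
        by_cases hx : x = a
        · subst hx; simp
        · simp [hx, Ne.symm hx]
      · rw [if_neg heq]
        by_cases hx : x = a
        · subst hx
          have h0 : (b :: t').count x = 0 := by
            rw [List.count_eq_zero]
            intro hmem
            rcases List.mem_cons.1 hmem with rfl | hmem'
            · exact heq rfl
            · have hbz : b ≤ x := (List.pairwise_cons.1 htl).1 _ hmem'
              have : x < b := lt_of_le_of_ne hab heq
              exact absurd hbz (not_le.2 this)
          simp [h0]

        · simp [List.count_cons, Ne.symm hx]

theorem nodup_pvAdjAdd (l : List Char) (d : PySem.Set Char) (hd : d.Nodup) :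
    (pvAdjAdd l d).Nodup := by
  induction l generalizing d with
  | nil => exact hd
  | cons a t ih =>
    cases t with
    | nil => exact hd
    | cons b t' =>
      simp only [pvAdjAdd]
      split_ifs
      · exact ih _ (PySem.Set.nodup_add _ _ hd)
      · exact ih _ hd

-- generic outer fold: any step whose membership is 'x ∈ d ∨ 2 ≤ b.count x'
theorem foldl_step_mem (step : PySem.Set Char → List Char → PySem.Set Char)
    (hmem : ∀ d b x, x ∈ step d b ↔ x ∈ d ∨ 2 ≤ b.count x)
    (hnd : ∀ d b, d.Nodup → (step d b).Nodup) :
    ∀ (blocks : List (List Char)) (d : PySem.Set Char), d.Nodup →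
      (blocks.foldl step d).Nodup ∧
      ∀ x, x ∈ blocks.foldl step d ↔ x ∈ d ∨ ∃ b ∈ blocks, 2 ≤ b.count x := by
  intro blocks
  induction blocks with
  | nil => intro d hd; simpa using hd
  | cons b t ih =>
    intro d hd
    simp only [List.foldl_cons]
    obtain ⟨hn, hm⟩ := ih (step d b) (hnd d b hd)
    refine ⟨hn, fun x => (hm x).trans ?_⟩
    rw [hmem]
    simp only [List.mem_cons]
    constructor
    · rintro ((h | h) | ⟨c, hc1, hc2⟩)
      · exact Or.inl h
      · exact Or.inr ⟨b, Or.inl rfl, h⟩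
      · exact Or.inr ⟨c, Or.inr hc1, hc2⟩
    · rintro (h | ⟨c, rfl | hc1, hc2⟩)
      · exact Or.inl (Or.inl h)
      · exact Or.inl (Or.inr hc2)
      · exact Or.inr ⟨c, hc1, hc2⟩

theorem stepA_mem (d : PySem.Set Char) (b : List Char) (x : Char) :
    x ∈ (let c := PySem.Dict.counter b
         c.keys.foldl (fun dup item =>
           if c.getD item 0 ≥ 2 then PySem.Set.add dup item else dup) d) ↔
      x ∈ d ∨ 2 ≤ b.count x := by
  rw [memA_inner]
  simp only [PySem.Dict.keys_counter, PySem.Set.mem_ofList, PySem.Dict.getD_counter]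
  constructor
  · rintro (h | ⟨_, h2⟩)
    · exact Or.inl h
    · exact Or.inr (by exact_mod_cast h2)
  · rintro (h | h)
    · exact Or.inl h
    · refine Or.inr ⟨?_, by exact_mod_cast h⟩
      rw [← List.count_pos_iff]; omega

theorem stepB_mem (d : PySem.Set Char) (b : List Char) (x : Char) :
    x ∈ pvAdjAdd (PySem.List.sorted b (fun c => c) false) d ↔ x ∈ d ∨ 2 ≤ b.count x := by
  rw [mem_pvAdjAdd _ (PySem.List.sorted_pairwise b (fun c => c))]
  rw [(PySem.List.sorted_perm b (fun c => c) false).count_eq]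

theorem pvDup_mem_nodup (blocks : List (List Char)) :
    (∀ x, x ∈ pvDupA blocks ↔ ∃ b ∈ blocks, 2 ≤ b.count x) ∧ (pvDupA blocks).Nodup ∧
    (∀ x, x ∈ pvDupB blocks ↔ ∃ b ∈ blocks, 2 ≤ b.count x) ∧ (pvDupB blocks).Nodup := by
  obtain ⟨hAn, hAm⟩ := foldl_step_mem
    (fun d block => let c := PySem.Dict.counter block
      c.keys.foldl (fun dup item =>
        if c.getD item 0 ≥ 2 then PySem.Set.add dup item else dup) d)
    stepA_mem
    (fun d b hd => nodupA_inner _ _ _ hd)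
    blocks PySem.Set.empty List.nodup_nil
  obtain ⟨hBn, hBm⟩ := foldl_step_mem
    (fun d block => pvAdjAdd (PySem.List.sorted block (fun c => c) false) d)
    stepB_mem
    (fun d b hd => nodup_pvAdjAdd _ _ hd)
    blocks PySem.Set.empty List.nodup_nil
  refine ⟨fun x => (hAm x).trans ?_, hAn, fun x => (hBm x).trans ?_, hBn⟩ <;>
    simp [PySem.Set.empty]

theorem len_symmDiff_congr (a a' b b' : PySem.Set Char)
    (ha : a.Perm a') (hb : ∀ x, x ∈ b ↔ x ∈ b') (hb' : b.Perm b') :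
    PySem.Set.len (PySem.Set.symmDiff a b) = PySem.Set.len (PySem.Set.symmDiff a' b') := by
  have ha' : ∀ x, x ∈ a ↔ x ∈ a' := fun x => ha.mem_iff
  have hcb : ∀ x, PySem.Set.contains b x = PySem.Set.contains b' x := by
    intro x
    rw [Bool.eq_iff_iff, PySem.Set.contains_iff, PySem.Set.contains_iff]
    exact hb x
  have hca : ∀ x, PySem.Set.contains a x = PySem.Set.contains a' x := by
    intro x
    rw [Bool.eq_iff_iff, PySem.Set.contains_iff, PySem.Set.contains_iff]
    exact ha' x
  unfold PySem.Set.len PySem.Set.symmDiff PySem.Set.diff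
  have p1 : (List.filter (fun x => !PySem.Set.contains b x) a).Perm
      (List.filter (fun x => !PySem.Set.contains b' x) a') := by
    rw [List.filter_congr (fun x _ => by rw [hcb x])]
    exact ha.filter _
  have p2 : (List.filter (fun x => !PySem.Set.contains a x) b).Perm
      (List.filter (fun x => !PySem.Set.contains a' x) b') := by
    rw [List.filter_congr (fun x _ => by rw [hca x])]
    exact hb'.filter _
  simp only [List.length_append]
  rw [p1.length_eq, p2.length_eq]

-- ===== VERDICT (by name: the statement is the Claim_ definition above) =====
theorem computeDuplication_spec : Claim_equal_computeDuplication := by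
  intro s1 s2 _
  unfold Spec_computeDuplication computeDuplication computeDuplication_alt
  have perm : ∀ blocks : List (List Char), (pvDupA blocks).Perm (pvDupB blocks) := by
    intro blocks
    obtain ⟨hAm, hAn, hBm, hBn⟩ := pvDup_mem_nodup blocks
    exact (List.perm_ext_iff_of_nodup hAn hBn).2 (fun x => (hAm x).trans (hBm x).symm)
  exact len_symmDiff_congr _ _ _ _ (perm _)
    (fun x => ((pvDup_mem_nodup _).1 x).trans ((pvDup_mem_nodup _).2.2.1 x).symm) (perm _)
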